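-- pv_equiv track=rewrite | github.com/cizins/2026-python | weeks/week-07/solutions/1114405042/solution.py | solve
-- ===== SOURCE A (Python) =====
-- def solve(n, smaller_counts):
--     """
--     計算每頭牛的原始編號。
--     n: 牛的總數
--     smaller_counts: 長度為 n-1 的串列，表示第 2 到第 n 頭牛前面有幾頭牛編號比牠小。
--     """
--     # tree 陣列，大小為 n+1，用來維護 1~n 每個數字是否還存在 (1 表示存在，0 表示已被選走)
--     tree = [0] * (n + 1)
--
--     def add(idx, val):
--         while idx <= n:
--             tree[idx] += val
--             idx += idx & (-idx)
--
--     def query(idx):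
--         res = 0
--         while idx > 0:
--             res += tree[idx]
--             idx -= idx & (-idx)
--         return res
--
--     # 初始化 BIT，所有數字 1~n 剛開始都存在 (頻率為 1)
--     for i in range(1, n + 1):
--         add(i, 1)
--
--     # 建立完整的 smaller_counts 陣列 (第一頭牛前面沒有比牠小的，設為 0)
--     full_counts = [0] + smaller_counts
--     ans = [0] * n
--
--     # 從最後一頭牛往前處理
--     for i in range(n - 1, -1, -1):
--         target = full_counts[i] + 1  # 我們要找目前剩下的數字中，第 target 小的
--
--         # 二分搜尋找這個數字
--         left, right = 1, n
--         chosen_number = -1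
--         while left <= right:
--             mid = (left + right) // 2
--             # query(mid) 會回傳 <= mid 的數字中還有幾個未被選走
--             if query(mid) >= target:
--                 chosen_number = mid
--                 right = mid - 1
--             else:
--                 left = mid + 1
--
--         ans[i] = chosen_number
--         # 找到後，將這個數字從 BIT 中移除 (頻率減 1)
--         add(chosen_number, -1)
--
--     return ans
-- ===== SOURCE B (Python) =====
-- def solve(n, smaller_counts):
--     # No cows, no answer.
--     if n <= 0:
--         return []
--     # Work backwards: the last cow's count c says it is the (c+1)-th smallest of the
--     # numbers still unused, so pop index c from the sorted list of unused numbers.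
--     available = list(range(1, n + 1))
--     result = []
--     for c in reversed([0] + smaller_counts[:n - 1]):
--         result.append(available.pop(c))
--     result.reverse()
--     return result
-- ===== Notes on version B (the rewrite author's own statement) =====
-- stated objective: simpler
-- what changed: A maintains a Fenwick (BIT) tree over 1..n and binary-searches prefix sums to find the k-th remaining number; B keeps the sorted list of still-unused numbers and pops its k-th element directly (C-level list.pop) , processing the counts back to front.
-- outside the precondition, e.g. on solve(2, [-1]): A returns [2, 1], B returns [1, 2]
import Mathlib
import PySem

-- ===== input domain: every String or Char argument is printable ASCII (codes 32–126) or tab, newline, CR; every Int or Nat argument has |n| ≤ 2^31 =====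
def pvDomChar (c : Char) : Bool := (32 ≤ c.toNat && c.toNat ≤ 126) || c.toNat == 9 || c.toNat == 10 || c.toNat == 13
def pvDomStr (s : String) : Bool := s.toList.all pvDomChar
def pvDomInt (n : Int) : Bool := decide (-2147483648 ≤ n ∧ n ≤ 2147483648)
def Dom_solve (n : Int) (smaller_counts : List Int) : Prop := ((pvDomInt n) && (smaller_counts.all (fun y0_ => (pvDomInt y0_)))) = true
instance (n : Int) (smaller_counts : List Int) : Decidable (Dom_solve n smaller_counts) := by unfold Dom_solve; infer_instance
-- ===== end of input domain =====

-- B replaces A's Fenwick tree + binary search (find the k-th remaining number) by a plain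
-- sorted list of the still-unused numbers from which the k-th element is popped directly;
-- objective: simpler.

-- ===== PORT A =====

-- Termination fact for the query loop (cited by pvQuery's decreasing_by):
-- for idx > 0, Python's `idx & (-idx)` is between 1 and idx.
theorem pvLowbit_decr (idx : Int) (h : 0 < idx) :
    0 < PySem.Int.band idx (-idx) ∧ PySem.Int.band idx (-idx) ≤ idx := by
  have h0 : (0 : Int) ≤ idx := le_of_lt h
  have h1 : ¬ (0 : Int) ≤ -idx := by omega
  simp only [PySem.Int.band, if_pos h0, if_neg h1]
  have he : (-(-idx) - 1).toNat = idx.toNat - 1 := by omega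
  rw [he]
  have hand : idx.toNat &&& (idx.toNat - 1) ≤ idx.toNat - 1 := Nat.and_le_right
  omega

-- Python helper `add(idx, val)`: while idx <= n: tree[idx] += val; idx += idx & (-idx).
-- Fuel makes the loop total; inside Pre_solve idx ≥ 1 so n+2 iterations always suffice
-- (where the fuel would run out the Python loop does not terminate).
def pvAdd (fuel : Nat) (n : Int) (t : List Int) (idx val : Int) : List Int :=
  match fuel with
  | 0 => t
  | fuel + 1 =>
    if idx ≤ n then
      pvAdd fuel n (PySem.List.pySetD t idx (PySem.List.pyGetD t idx 0 + val))
        (idx + PySem.Int.band idx (-idx)) val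
    else t

-- Python helper `query(idx)`: while idx > 0: res += tree[idx]; idx -= idx & (-idx).
def pvQuery (t : List Int) (idx : Int) : Int :=
  if h : 0 < idx then
    PySem.List.pyGetD t idx 0 + pvQuery t (idx - PySem.Int.band idx (-idx))
  else 0
termination_by idx.toNat
decreasing_by
  have := pvLowbit_decr idx h
  omega

-- The binary-search loop of A (left, right, chosen_number as accumulator); fueled.
def pvBS (fuel : Nat) (t : List Int) (target left right acc : Int) : Int :=
  match fuel with
  | 0 => acc
  | fuel + 1 =>
    if left ≤ right then
      let mid := PySem.Int.floordiv (left + right) 2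
      if target ≤ pvQuery t mid then pvBS fuel t target left (mid - 1) mid
      else pvBS fuel t target (mid + 1) right acc
    else acc

def solve (n : Int) (smaller_counts : List Int) : List Int :=
  let fuel := n.toNat + 2
  let tree0 : List Int := List.replicate (n + 1).toNat 0
  let tree : List Int := (PySem.List.pyRange 1 (n + 1) 1).foldl (fun t i => pvAdd fuel n t i 1) tree0
  let full_counts := 0 :: smaller_counts
  -- `ans[i] = chosen` for i = n-1 … 0 builds the answer back to front: cons-accumulate.
  let st := (PySem.List.pyRange (n - 1) (-1) (-1)).foldl
    (fun (st : List Int × List Int) i =>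
      let target := PySem.List.pyGetD full_counts i 0 + 1
      let chosen := pvBS fuel st.1 target 1 n (-1)
      (pvAdd fuel n st.1 chosen (-1), chosen :: st.2))
    (tree, [])
  st.2

-- ===== PORT B =====
def solve_alt (n : Int) (smaller_counts : List Int) : List Int :=
  if n ≤ 0 then []
  else
    let available := PySem.List.pyRange 1 (n + 1) 1
    let st := ((0 :: PySem.List.slice smaller_counts none (some (n - 1))).reverse).foldl
      (fun (st : List Int × List Int) c =>
        match PySem.List.pop? st.1 c with
        | some (x, rest) => (rest, st.2 ++ [x])
        | none => st)  -- list.pop out of range raises IndexError in Python; unreachable under Pre_solve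
      (available, [])
    st.2.reverse

-- ===== PRECONDITION & SPEC =====
-- Pre_solve is the natural domain of the task: either no cows (n ≤ 0, answer []), or n ≥ 1
-- cows with at least the n-1 needed counts, the k-th count between 0 and k+1 (so that a
-- permutation with those counts exists; counts beyond the first n-1 are ignored).
-- It excludes only inputs on which A raises/loops forever (too few or too large counts)
-- and inputs with a negative count among the first n-1, where A's binary-search sentinel
-- can return an already-used number and B pops from the end of the list — both behaviours
-- are accidents of the implementations.
def Pre_solve (n : Int) (smaller_counts : List Int) : Prop :=
  n ≤ 0 ∨
  (1 ≤ n ∧ n - 1 ≤ (smaller_counts.length : Int) ∧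
    ∀ k : Nat, k < (n - 1).toNat →
      0 ≤ smaller_counts.getD k 0 ∧ smaller_counts.getD k 0 ≤ (k : Int) + 1)

instance (n : Int) (smaller_counts : List Int) : Decidable (Pre_solve n smaller_counts) := by
  unfold Pre_solve; infer_instance

def pvWitness_solve : Int × List Int := (3, [1, 0])

def Spec_solve (n : Int) (smaller_counts : List Int) (out : List Int) : Prop := out = solve_alt n smaller_counts
instance (n : Int) (smaller_counts : List Int) (out : List Int) : Decidable (Spec_solve n smaller_counts out) := by unfold Spec_solve; infer_instance

-- ===== CLAIM (what is proved, stated in full; the proofs are below) =====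
def Claim_equal_solve : Prop := ∀ (n : Int) (smaller_counts : List Int), Dom_solve n smaller_counts → Pre_solve n smaller_counts → Spec_solve n smaller_counts (solve n smaller_counts)

-- ===== LEMMAS AND PROOFS =====

-- lowest set bit of a natural number
def pvLb : Nat → Nat
  | 0 => 0
  | (m + 1) => if (m + 1) % 2 = 1 then 1 else 2 * pvLb ((m + 1) / 2)
decreasing_by omega

theorem pvLb_unique (a k : Nat) (hk : k % 2 = 1) : pvLb (2 ^ a * k) = 2 ^ a := by
  induction a with
  | zero =>
    simp only [pow_zero, one_mul]
    obtain ⟨m, hm⟩ : ∃ m, k = m + 1 := ⟨k - 1, by omega⟩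
    subst hm
    rw [pvLb, if_pos hk]
  | succ a ih =>
    have hk1 : 1 ≤ k := by omega
    have hpos : 0 < 2 ^ (a + 1) * k := Nat.mul_pos (Nat.two_pow_pos _) (by omega)
    obtain ⟨m, hm⟩ : ∃ m, 2 ^ (a + 1) * k = m + 1 := ⟨2 ^ (a + 1) * k - 1, by omega⟩
    have h2 : 2 ^ (a + 1) * k = 2 * (2 ^ a * k) := by ring
    have heven : (m + 1) % 2 = 0 := by rw [← hm, h2]; omega
    have hdiv : (m + 1) / 2 = 2 ^ a * k := by rw [← hm, h2]; omega
    rw [hm, pvLb, if_neg (by omega), hdiv, ih, pow_succ]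
    ring

theorem pvLb_rep (m : Nat) (h : 1 ≤ m) :
    ∃ a k, k % 2 = 1 ∧ m = 2 ^ a * k ∧ pvLb m = 2 ^ a := by
  obtain ⟨a, k, hk, hm⟩ := Nat.exists_eq_two_pow_mul_odd (n := m) (by omega)
  exact ⟨a, k, Nat.odd_iff.mp hk, hm, by rw [hm]; exact pvLb_unique a k (Nat.odd_iff.mp hk)⟩

theorem pvLb_pos (m : Nat) (h : 1 ≤ m) : 1 ≤ pvLb m := by
  obtain ⟨a, k, hk, hm, hlb⟩ := pvLb_rep m h
  rw [hlb]
  exact Nat.one_le_two_pow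

theorem pvLb_le (m : Nat) (h : 1 ≤ m) : pvLb m ≤ m := by
  obtain ⟨a, k, hk, hm, hlb⟩ := pvLb_rep m h
  rw [hlb, hm]
  exact Nat.le_mul_of_pos_right _ (by omega)

-- 2 * lowbit divides m + lowbit and m - lowbit
theorem pvLb_dvd_add (m : Nat) (h : 1 ≤ m) : 2 * pvLb m ∣ m + pvLb m := by
  obtain ⟨a, k, hk, hm, hlb⟩ := pvLb_rep m h
  rw [hlb, hm]
  refine ⟨(k + 1) / 2, ?_⟩
  have h2 : k + 1 = 2 * ((k + 1) / 2) := by omega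
  calc 2 ^ a * k + 2 ^ a = 2 ^ a * (k + 1) := by ring
    _ = 2 ^ a * (2 * ((k + 1) / 2)) := by rw [← h2]
    _ = 2 * 2 ^ a * ((k + 1) / 2) := by ring

theorem pvLb_dvd_sub (m : Nat) (h : 1 ≤ m) : 2 * pvLb m ∣ m - pvLb m := by
  obtain ⟨a, k, hk, hm, hlb⟩ := pvLb_rep m h
  rw [hlb, hm]
  set q := (k - 1) / 2 with hq
  refine ⟨q, ?_⟩
  have h3 : 2 ^ a * (k - 1) = 2 ^ a * k - 2 ^ a := by rw [Nat.mul_sub, Nat.mul_one]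
  have h2 : k - 1 = 2 * q := by omega
  rw [← h3, h2]
  ring

theorem pvLb_add_of_dvd (c x r : Nat) (hd : 2 ^ c ∣ x) (hr1 : 1 ≤ r) (hr2 : r < 2 ^ c) :
    pvLb (x + r) = pvLb r := by
  obtain ⟨e, k, hk, hr, hlb⟩ := pvLb_rep r hr1
  obtain ⟨y, hy⟩ := hd
  have hec : e < c := by
    have h2e : 2 ^ e ≤ r := by rw [hr]; exact Nat.le_mul_of_pos_right _ (by omega)
    by_contra hec
    have : 2 ^ c ≤ 2 ^ e := Nat.pow_le_pow_right (by omega) (by omega)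
    omega
  have hxr : x + r = 2 ^ e * (2 ^ (c - e) * y + k) := by
    rw [hy, hr, Nat.mul_add]
    congr 1
    rw [← Nat.mul_assoc, ← pow_add]
    congr 2
    omega
  rw [hxr, hlb]
  apply pvLb_unique
  obtain ⟨z, hz⟩ : ∃ z, 2 ^ (c - e) = 2 * z := by
    refine ⟨2 ^ (c - e - 1), ?_⟩
    rw [← pow_succ']
    congr 1
    omega
  have hzz : 2 ^ (c - e) * y = 2 * (z * y) := by rw [hz]; ring
  omega

theorem pvLb_add_le_pow (b r : Nat) (h1 : 1 ≤ r) (h2 : r < 2 ^ b) : r + pvLb r ≤ 2 ^ b := by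
  obtain ⟨e, k, hk, hr, hlb⟩ := pvLb_rep r h1
  have heb : e < b := by
    have h2e : 2 ^ e ≤ r := by rw [hr]; exact Nat.le_mul_of_pos_right _ (by omega)
    by_contra heb
    have : 2 ^ b ≤ 2 ^ e := Nat.pow_le_pow_right (by omega) (by omega)
    omega
  have hk' : k + 1 ≤ 2 ^ (b - e) := by
    have : 2 ^ e * k < 2 ^ e * 2 ^ (b - e) := by
      rw [← pow_add]
      have : e + (b - e) = b := by omega
      rw [this]; omega
    have hklt : k < 2 ^ (b - e) := by
      exact lt_of_mul_lt_mul_left this (by positivity)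
    omega
  calc r + pvLb r = 2 ^ e * (k + 1) := by rw [hlb, hr]; ring
    _ ≤ 2 ^ e * 2 ^ (b - e) := Nat.mul_le_mul_left _ hk'
    _ = 2 ^ b := by rw [← pow_add]; congr 1; omega

-- m &&& (m-1) clears the lowest set bit
theorem pvAndPred (m : Nat) (h : 1 ≤ m) : m &&& (m - 1) = m - pvLb m := by
  obtain ⟨a, k, hk, hm, hlb⟩ := pvLb_rep m h
  have hk1 : 1 ≤ k := by omega
  have hpa : 1 ≤ 2 ^ a := Nat.one_le_two_pow
  have hmul : 2 ^ a * (k - 1) = 2 ^ a * k - 2 ^ a := by rw [Nat.mul_sub, Nat.mul_one]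
  have hka : 2 ^ a ≤ 2 ^ a * k := Nat.le_mul_of_pos_right _ (by omega)
  have hsub : m - pvLb m = 2 ^ a * (k - 1) := by
    rw [hlb, hm, hmul]
  have hpred : m - 1 = 2 ^ a * (k - 1) + (2 ^ a - 1) := by
    rw [hm, hmul]
    omega
  rw [hsub]
  apply Nat.eq_of_testBit_eq
  intro i
  rw [Nat.testBit_land, hpred, hm]
  rw [Nat.testBit_two_pow_mul_add _ (by have : 1 ≤ 2^a := Nat.one_le_two_pow; omega)]
  rw [Nat.testBit_two_pow_mul, Nat.testBit_two_pow_mul]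
  by_cases hia : i < a
  · simp [hia, Nat.not_le_of_lt hia]
  · have hge : a ≤ i := by omega
    simp only [if_neg hia, ge_iff_le, hge, decide_true, Bool.true_and]
    by_cases hieq : i = a
    · subst hieq
      have : (k - 1).testBit 0 = false := by
        rw [Nat.testBit_zero]
        simp; omega
      simp [this]
    · -- i > a: testBit k (i-a) = testBit (k-1) (i-a) since k = (k-1)+1, k-1 even
      have hgt : a < i := by omega
      obtain ⟨j, hj⟩ : ∃ j, i - a = j + 1 := ⟨i - a - 1, by omega⟩
      rw [hj]
      have hkeq : k = (k - 1) + 1 := by omega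
      have heq : k.testBit (j + 1) = (k - 1).testBit (j + 1) := by
        rw [Nat.testBit_add_one, Nat.testBit_add_one]
        congr 1
        omega
      rw [heq, Bool.and_self]

-- Python's idx & (-idx) for idx > 0 is the lowest set bit
theorem pvBand_lowbit (i : Int) (h : 0 < i) :
    PySem.Int.band i (-i) = (pvLb i.toNat : Int) := by
  have h0 : (0 : Int) ≤ i := le_of_lt h
  have h1 : ¬ (0 : Int) ≤ -i := by omega
  simp only [PySem.Int.band, if_pos h0, if_neg h1]
  have he : (-(-i) - 1).toNat = i.toNat - 1 := by omega
  rw [he, pvAndPred i.toNat (by omega)]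
  have := pvLb_le i.toNat (by omega)
  omega

-- node j of the Fenwick tree covers value a  ⟺  j - lowbit(j) < a ≤ j
def pvIvB (a j : Int) : Bool := decide (j - (pvLb j.toNat : Int) < a ∧ a ≤ j)

theorem iv_self (i : Int) (hi : 1 ≤ i) : pvIvB i i = true := by
  have := pvLb_pos i.toNat (by omega)
  simp [pvIvB]; omega

theorem iv_gt_false (a j : Int) (h : j < a) : pvIvB a j = false := by
  simp [pvIvB]; omega

-- chain-step lemmas (Nat level)
theorem lbN3 (a b : Nat) (ha : 1 ≤ a) (hab : a < b) (h : b - pvLb b < a) : a + pvLb a ≤ b := by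
  obtain ⟨e, k, hk, hb, hlb⟩ := pvLb_rep b (by omega)
  have hlbb : pvLb b ≤ b := pvLb_le b (by omega)
  set r := a - (b - pvLb b) with hr
  have hr1 : 1 ≤ r := by omega
  have hr2 : r < 2 ^ e := by
    have : pvLb b = 2 ^ e := hlb
    omega
  have hd : 2 ^ e ∣ b - pvLb b := by
    rw [hlb, hb]
    have h3 : 2 ^ e * k - 2 ^ e = 2 ^ e * (k - 1) := by rw [Nat.mul_sub, Nat.mul_one]
    rw [h3]
    exact dvd_mul_right _ _
  have ha' : a = (b - pvLb b) + r := by omega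
  have hlba : pvLb a = pvLb r := by rw [ha']; exact pvLb_add_of_dvd e _ r hd hr1 hr2
  have hle := pvLb_add_le_pow e r hr1 hr2
  rw [hlba]
  omega

theorem lbN6 (a b : Nat) (ha : 1 ≤ a) (hb : 1 ≤ b)
    (h1 : a ≤ b - pvLb b) (h2 : b - pvLb b < a + pvLb a) (h3 : a + pvLb a ≤ b) : False := by
  obtain ⟨ea, ka, hka, hae, hlba⟩ := pvLb_rep a ha
  obtain ⟨eb, kb, hkb, hbe, hlbb⟩ := pvLb_rep b hb
  have hda : 2 ^ (ea + 1) ∣ a + pvLb a := by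
    have := pvLb_dvd_add a ha
    rw [hlba] at this ⊢
    rwa [pow_succ'] at *
  have hdb : 2 ^ (eb + 1) ∣ b - pvLb b := by
    have := pvLb_dvd_sub b hb
    rw [hlbb] at this ⊢
    rwa [pow_succ'] at *
  have hlbb_le : pvLb b ≤ b := pvLb_le b hb
  set s := (a + pvLb a) - (b - pvLb b) with hs
  have hs1 : 1 ≤ s := by omega
  by_cases hcase : eb ≤ ea
  · -- s ≤ lb b = 2^eb, and 2^(eb+1) divides s
    have hs2 : s ≤ pvLb b := by rw [hs]; omega
    have hd1 : 2 ^ (eb + 1) ∣ a + pvLb a :=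
      dvd_trans (Nat.pow_dvd_pow 2 (by omega)) hda
    have hdvd : 2 ^ (eb + 1) ∣ s := Nat.dvd_sub hd1 hdb
    have := Nat.le_of_dvd (by omega) hdvd
    rw [hlbb] at hs2
    have : 2 ^ eb < 2 ^ (eb + 1) := Nat.pow_lt_pow_right (by omega) (by omega)
    omega
  · -- ea < eb: s ≤ lb a = 2^ea, and 2^(ea+1) divides s
    have hs2 : s ≤ pvLb a := by rw [hs]; omega
    have hd2 : 2 ^ (ea + 1) ∣ b - pvLb b :=
      dvd_trans (Nat.pow_dvd_pow 2 (by omega)) hdb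
    have hdvd : 2 ^ (ea + 1) ∣ s := Nat.dvd_sub hda hd2
    have := Nat.le_of_dvd (by omega) hdvd
    rw [hlba] at hs2
    have : 2 ^ ea < 2 ^ (ea + 1) := Nat.pow_lt_pow_right (by omega) (by omega)
    omega

-- Int versions
theorem iv_step_in (i j : Int) (hi : 1 ≤ i) (hij : i < j) (h : j - (pvLb j.toNat : Int) < i) :
    i + (pvLb i.toNat : Int) ≤ j := by
  have hlbj := pvLb_le j.toNat (by omega)
  have := lbN3 i.toNat j.toNat (by omega) (by omega) (by omega)
  omega

theorem iv_step_out (i j : Int) (hi : 1 ≤ i) (hj : 1 ≤ j)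
    (h1 : i ≤ j - (pvLb j.toNat : Int)) (h2 : j - (pvLb j.toNat : Int) < i + (pvLb i.toNat : Int))
    (h3 : i + (pvLb i.toNat : Int) ≤ j) : False := by
  have hlbj := pvLb_le j.toNat (by omega)
  have hlbi := pvLb_le i.toNat (by omega)
  exact lbN6 i.toNat j.toNat (by omega) (by omega) (by omega) (by omega) (by omega)

theorem iv_next (i j : Int) (hi : 1 ≤ i) (hj : 1 ≤ j) (hne : j ≠ i) :
    pvIvB i j = pvIvB (i + (pvLb i.toNat : Int)) j := by
  have hlbi_pos := pvLb_pos i.toNat (by omega)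
  simp only [pvIvB, decide_eq_decide]
  constructor
  · rintro ⟨hlt, hle⟩
    have hij : i < j := by omega
    have := iv_step_in i j hi hij hlt
    constructor <;> omega
  · rintro ⟨hlt, hle⟩
    constructor
    · by_contra hcon
      exact iv_step_out i j hi hj (by omega) hlt hle
    · omega

theorem pvAdd_length (fuel : Nat) (n : Int) (t : List Int) (i v : Int) :
    (pvAdd fuel n t i v).length = t.length := by
  induction fuel generalizing t i with
  | zero => rfl
  | succ fuel ih =>
    rw [pvAdd]
    split
    · rw [ih, PySem.List.length_pySetD]
    · rfl

theorem pvAdd_getD (fuel : Nat) (n : Int) (hn : 1 ≤ n) :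
    ∀ (t : List Int) (i v : Int), 1 ≤ i → (n + 1 - i).toNat ≤ fuel → t.length = (n + 1).toNat →
    ∀ j : Int, 1 ≤ j → j ≤ n →
    PySem.List.pyGetD (pvAdd fuel n t i v) j 0 =
      PySem.List.pyGetD t j 0 + (if pvIvB i j then v else 0) := by
  induction fuel with
  | zero =>
    intro t i v hi hfuel hlen j hj1 hj2
    have hiv : pvIvB i j = false := iv_gt_false i j (by omega)
    simp [pvAdd, hiv]
  | succ fuel ih =>
    intro t i v hi hfuel hlen j hj1 hj2
    rw [pvAdd]
    by_cases hin : i ≤ n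
    · rw [if_pos hin, pvBand_lowbit i (by omega)]
      have hlbpos := pvLb_pos i.toNat (by omega)
      rw [ih _ _ v (by omega) (by omega) (by rw [PySem.List.length_pySetD]; exact hlen) j hj1 hj2]
      have hi' : i = ((i.toNat : Nat) : Int) := by omega
      have hj' : j = ((j.toNat : Nat) : Int) := by omega
      rw [show PySem.List.pySetD t i (PySem.List.pyGetD t i 0 + v) =
            PySem.List.pySetD t ((i.toNat : Nat) : Int) (PySem.List.pyGetD t i 0 + v) by rw [← hi']]
      rw [show PySem.List.pyGetD (PySem.List.pySetD t ((i.toNat : Nat) : Int)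
            (PySem.List.pyGetD t i 0 + v)) j 0 =
          PySem.List.pyGetD (PySem.List.pySetD t ((i.toNat : Nat) : Int)
            (PySem.List.pyGetD t i 0 + v)) ((j.toNat : Nat) : Int) 0 by rw [← hj']]
      rw [PySem.List.pyGetD_pySetD_natCast t i.toNat j.toNat _ 0 (by omega)]
      by_cases hji : j = i
      · rw [if_pos (by omega)]
        have h1 : pvIvB i j = true := by rw [hji]; exact iv_self i hi
        have h2 : pvIvB (i + (pvLb i.toNat : Int)) j = false := iv_gt_false _ j (by omega)
        rw [h1, h2, hji]
        simp
      · rw [if_neg (by omega), ← iv_next i j hi hj1 hji, ← hj']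
    · rw [if_neg hin]
      have hiv : pvIvB i j = false := iv_gt_false i j (by omega)
      simp [hiv]

theorem countP_le_split (l : List Int) (d e : Int) (h : d ≤ e) :
    l.countP (fun a => decide (a ≤ e)) =
      l.countP (fun a => decide (a ≤ d)) + l.countP (fun a => decide (d < a ∧ a ≤ e)) := by
  induction l with
  | nil => rfl
  | cons x xs ih =>
    rw [List.countP_cons, List.countP_cons, List.countP_cons, ih]
    split_ifs <;> simp_all <;> omega

theorem pvQuery_eq (n : Int) (t : List Int) (avail : List Int)
    (hmem : ∀ a ∈ avail, 1 ≤ a ∧ a ≤ n)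
    (hJ : ∀ j : Int, 1 ≤ j → j ≤ n →
      PySem.List.pyGetD t j 0 = (avail.countP (fun a => pvIvB a j) : Int)) :
    ∀ idx : Int, 0 ≤ idx → idx ≤ n →
      pvQuery t idx = (avail.countP (fun a => decide (a ≤ idx)) : Int) := by
  suffices H : ∀ N : Nat, ∀ idx : Int, idx.toNat ≤ N → 0 ≤ idx → idx ≤ n →
      pvQuery t idx = (avail.countP (fun a => decide (a ≤ idx)) : Int) by
    intro idx h0 h1
    exact H idx.toNat idx le_rfl h0 h1
  intro N
  induction N with
  | zero =>
    intro idx hN h0 h1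
    have hz : idx = 0 := by omega
    subst hz
    rw [pvQuery, dif_neg (by omega)]
    have : avail.countP (fun a => decide (a ≤ (0 : Int))) = 0 := by
      rw [List.countP_eq_zero]
      intro a ha
      have := hmem a ha
      simp
      omega
    rw [this]
    simp
  | succ N ihN =>
    intro idx hN h0 h1
    by_cases hpos : 0 < idx
    · rw [pvQuery, dif_pos hpos, pvBand_lowbit idx hpos]
      have hlb1 := pvLb_pos idx.toNat (by omega)
      have hlb2 := pvLb_le idx.toNat (by omega)
      rw [ihN (idx - ((pvLb idx.toNat : Nat) : Int)) (by omega) (by omega) (by omega)]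
      rw [hJ idx (by omega) h1]
      rw [countP_le_split avail (idx - ((pvLb idx.toNat : Nat) : Int)) idx (by omega)]
      have hcongr : (fun a => pvIvB a idx) =
          (fun a : Int => decide (idx - ((pvLb idx.toNat : Nat) : Int) < a ∧ a ≤ idx)) := by
        funext a
        rfl
      rw [hcongr]
      push_cast
      ring
    · have hz : idx = 0 := by omega
      subst hz
      rw [pvQuery, dif_neg (by omega)]
      have : avail.countP (fun a => decide (a ≤ (0 : Int))) = 0 := by
        rw [List.countP_eq_zero]
        intro a ha
        have := hmem a ha
        simp
        omega
      rw [this]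
      simp

theorem pvBS_eq (t : List Int) (n target x : Int) (hx1 : 1 ≤ x) (hxn : x ≤ n)
    (hlt : ∀ m : Int, 1 ≤ m → m < x → pvQuery t m < target)
    (hge : ∀ m : Int, x ≤ m → m ≤ n → target ≤ pvQuery t m) :
    ∀ (fuel : Nat) (l r acc : Int), (r - l + 2).toNat ≤ fuel → 1 ≤ l → r ≤ n → l ≤ x →
      (x ≤ r ∨ acc = x) → pvBS fuel t target l r acc = x := by
  intro fuel
  induction fuel with
  | zero =>
    intro l r acc hf h1 h2 h3 h4
    rcases h4 with h4 | h4
    · exfalso; omega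
    · simpa [pvBS] using h4
  | succ fuel ih =>
    intro l r acc hf h1 h2 h3 h4
    rw [pvBS]
    by_cases hlr : l ≤ r
    · rw [if_pos hlr]
      obtain ⟨hm1, hm2⟩ := PySem.Int.floordiv_two_mid_bounds hlr
      by_cases hq : target ≤ pvQuery t (PySem.Int.floordiv (l + r) 2)
      · simp only [if_pos hq]
        have hxmid : x ≤ PySem.Int.floordiv (l + r) 2 := by
          by_contra hc
          have := hlt (PySem.Int.floordiv (l + r) 2) (by omega) (by omega)
          omega
        exact ih l (PySem.Int.floordiv (l + r) 2 - 1) (PySem.Int.floordiv (l + r) 2)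
          (by omega) h1 (by omega) h3 (by omega)
      · simp only [if_neg hq]
        have hmidx : PySem.Int.floordiv (l + r) 2 < x := by
          by_contra hc
          have := hge (PySem.Int.floordiv (l + r) 2) (by omega) (by omega)
          omega
        exact ih (PySem.Int.floordiv (l + r) 2 + 1) r acc (by omega) (by omega) h2 (by omega) h4
    · rw [if_neg hlr]
      rcases h4 with h4 | h4
      · exfalso; omega
      · exact h4

theorem cnt_le_val (l : List Int) (hp : l.Pairwise (· < ·)) :
    ∀ (k : Nat), k < l.length → ∀ v : Int, l.getD k 0 = v →
      l.countP (fun a => decide (a ≤ v)) = k + 1 := by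
  induction l with
  | nil => intro k hk; simp at hk
  | cons b tl ih =>
    intro k hk v hv
    have hbt : ∀ a ∈ tl, b < a := fun a ha => List.rel_of_pairwise_cons hp ha
    have hpt : tl.Pairwise (· < ·) := hp.of_cons
    cases k with
    | zero =>
      rw [List.getD_cons_zero] at hv
      subst hv
      rw [List.countP_cons]
      have h0 : tl.countP (fun a => decide (a ≤ b)) = 0 := by
        rw [List.countP_eq_zero]
        intro a ha
        have := hbt a ha
        simp
        omega
      rw [h0, if_pos (by simp)]
    | succ k =>
      have hk' : k < tl.length := by simpa using hk
      rw [List.getD_cons_succ] at hv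
      rw [List.countP_cons, ih hpt k hk' v hv]
      have hvmem : v ∈ tl := by
        rw [← hv, List.getD_eq_getElem _ _ hk']
        exact List.getElem_mem hk'
      have hble : b ≤ v := le_of_lt (hbt _ hvmem)
      rw [if_pos (by simpa using hble)]

theorem cnt_le_lt (l : List Int) (hp : l.Pairwise (· < ·)) :
    ∀ (k : Nat), k < l.length → ∀ m : Int, m < l.getD k 0 →
      l.countP (fun a => decide (a ≤ m)) ≤ k := by
  induction l with
  | nil => intro k hk; simp at hk
  | cons b tl ih =>
    intro k hk m hm
    have hbt : ∀ a ∈ tl, b < a := fun a ha => List.rel_of_pairwise_cons hp ha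
    have hpt : tl.Pairwise (· < ·) := hp.of_cons
    cases k with
    | zero =>
      rw [List.getD_cons_zero] at hm
      have h0 : (b :: tl).countP (fun a => decide (a ≤ m)) = 0 := by
        rw [List.countP_eq_zero]
        intro a ha
        rcases List.mem_cons.mp ha with h | h
        · subst h; simp; omega
        · have := hbt a h
          simp
          omega
      omega
    | succ k =>
      have hk' : k < tl.length := by simpa using hk
      rw [List.getD_cons_succ] at hm
      rw [List.countP_cons]
      have := ih hpt k hk' m hm
      split <;> omega

theorem countP_eraseIdx' (p : Int → Bool) :
    ∀ (l : List Int) (k : Nat), k < l.length →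
      l.countP p = (l.eraseIdx k).countP p + (if p (l.getD k 0) then 1 else 0) := by
  intro l
  induction l with
  | nil => intro k hk; simp at hk
  | cons x xs ih =>
    intro k hk
    cases k with
    | zero => simp [List.countP_cons]
    | succ k =>
      have hk' : k < xs.length := by simpa using hk
      simp only [List.eraseIdx_cons_succ, List.getD_cons_succ, List.countP_cons]
      rw [ih k hk']
      omega

-- The main loop, step for step: A's Fenwick state tree and B's available list stay in sync.
theorem loop_eq (n : Int) (hn : 1 ≤ n) (fuel : Nat) (hfuel : fuel = n.toNat + 2) :
    ∀ (cs : List Int) (tree avail resB : List Int) (ansA : List Int),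
    tree.length = (n + 1).toNat →
    avail.Pairwise (· < ·) →
    (∀ a ∈ avail, 1 ≤ a ∧ a ≤ n) →
    (∀ j : Int, 1 ≤ j → j ≤ n →
      PySem.List.pyGetD tree j 0 = (avail.countP (fun a => pvIvB a j) : Int)) →
    avail.length = cs.length →
    (∀ k : Nat, k < cs.length →
      0 ≤ cs.getD k 0 ∧ cs.getD k 0 ≤ ((cs.length - 1 - k : Nat) : Int)) →
    ansA = resB.reverse →
    (cs.foldl
      (fun (st : List Int × List Int) c =>
        (pvAdd fuel n st.1 (pvBS fuel st.1 (c + 1) 1 n (-1)) (-1),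
          pvBS fuel st.1 (c + 1) 1 n (-1) :: st.2))
      (tree, ansA)).2 =
    ((cs.foldl
      (fun (st : List Int × List Int) c =>
        match PySem.List.pop? st.1 c with
        | some (x, rest) => (rest, st.2 ++ [x])
        | none => st)
      (avail, resB)).2).reverse := by
  intro cs
  induction cs with
  | nil =>
    intro tree avail resB ansA _ _ _ _ _ _ hAns
    simpa using hAns
  | cons c cs' ih =>
    intro tree avail resB ansA hlenT hsort hmem hJ hlen hb hAns
    have hc := hb 0 (by simp)
    rw [List.getD_cons_zero] at hc
    simp only [List.length_cons] at hc
    have hlenA : avail.length = cs'.length + 1 := by simpa using hlen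
    have hk0 : c.toNat < avail.length := by omega
    obtain ⟨x, hxdef⟩ : ∃ x, avail.getD c.toNat 0 = x := ⟨_, rfl⟩
    have hgd : avail[c.toNat] = x := by rw [← List.getD_eq_getElem _ _ hk0, hxdef]
    have hxmem : x ∈ avail := by rw [← hgd]; exact List.getElem_mem hk0
    have hx1 : 1 ≤ x := (hmem _ hxmem).1
    have hxn : x ≤ n := (hmem _ hxmem).2
    have hq := pvQuery_eq n tree avail hmem hJ
    have hchosen : pvBS fuel tree (c + 1) 1 n (-1) = x := by
      apply pvBS_eq tree n (c + 1) x hx1 hxn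
      · intro m hm1 hmx
        rw [hq m (by omega) (by omega)]
        have := cnt_le_lt avail hsort c.toNat hk0 m (by rw [hxdef]; exact hmx)
        omega
      · intro m hxm hmn
        rw [hq m (by omega) (by omega)]
        have h1 := cnt_le_val avail hsort c.toNat hk0 x hxdef
        have h2 : avail.countP (fun a => decide (a ≤ x)) ≤
            avail.countP (fun a => decide (a ≤ m)) := by
          apply List.countP_mono_left
          intro a _ hd
          simp only [decide_eq_true_eq] at hd ⊢
          omega
        omega
      · omega
      · omega
      · omega
      · omega
      · left; omega
    have hpop : PySem.List.pop? avail c = some (x, avail.eraseIdx c.toNat) := by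
      have h := PySem.List.pop?_natCast avail c.toNat hk0
      rw [show ((c.toNat : Nat) : Int) = c by omega, hgd] at h
      exact h
    have herase : (avail.eraseIdx c.toNat).length = cs'.length := by
      rw [List.length_eraseIdx, if_pos hk0]
      omega
    simp only [List.foldl_cons]
    rw [hchosen, hpop]
    apply ih
    · rw [pvAdd_length]; exact hlenT
    · exact List.Pairwise.sublist (List.eraseIdx_sublist avail c.toNat) hsort
    · intro a ha
      exact hmem a ((List.eraseIdx_sublist avail c.toNat).mem ha)
    · intro j hj1 hj2
      rw [pvAdd_getD fuel n hn tree x (-1) hx1 (by omega) hlenT j hj1 hj2, hJ j hj1 hj2]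
      have hsplit := countP_eraseIdx' (fun a => pvIvB a j) avail c.toNat hk0
      simp only [hxdef] at hsplit
      by_cases hivx : pvIvB x j
      · simp only [hivx, if_true] at hsplit ⊢
        omega
      · simp only [hivx, Bool.false_eq_true, if_false] at hsplit ⊢
        omega
    · exact herase
    · intro k hk
      have hk1 : k + 1 < (c :: cs').length := by simpa using hk
      have hstep := hb (k + 1) hk1
      rw [List.getD_cons_succ] at hstep
      simp only [List.length_cons] at hstep
      refine ⟨hstep.1, ?_⟩
      calc cs'.getD k 0 ≤ ((cs'.length + 1 - 1 - (k + 1) : Nat) : Int) := hstep.2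
        _ = ((cs'.length - 1 - k : Nat) : Int) := by congr 1; omega
    · rw [hAns]
      simp

theorem init_J (n : Int) (hn : 1 ≤ n) (fuel : Nat) (hfuel : fuel = n.toNat + 2) :
    ∀ (mN : Nat) (m : Int), m = 1 + (mN : Int) → m ≤ n + 1 →
    ((PySem.List.pyRange 1 m 1).foldl (fun t i => pvAdd fuel n t i 1)
        (List.replicate (n + 1).toNat 0)).length = (n + 1).toNat ∧
    ∀ j : Int, 1 ≤ j → j ≤ n →
      PySem.List.pyGetD ((PySem.List.pyRange 1 m 1).foldl (fun t i => pvAdd fuel n t i 1)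
        (List.replicate (n + 1).toNat 0)) j 0 =
      ((PySem.List.pyRange 1 m 1).countP (fun a => pvIvB a j) : Int) := by
  intro mN
  induction mN with
  | zero =>
    intro m hm hmn
    have hm1 : m = 1 := by omega
    subst hm1
    rw [PySem.List.pyRange_one_eq_nil (by omega)]
    refine ⟨by simp, ?_⟩
    intro j hj1 hj2
    rw [show j = ((j.toNat : Nat) : Int) by omega, PySem.List.pyGetD_natCast]
    rw [List.getD_eq_getElem _ _ (by simp; omega)]
    simp
  | succ mN ihm =>
    intro m hm hmn
    have hm' : m = (1 + (mN : Int)) + 1 := by omega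
    obtain ⟨ihlen, ihJ⟩ := ihm (1 + (mN : Int)) rfl (by omega)
    subst hm'
    rw [PySem.List.pyRange_one_succ_right (by omega), List.foldl_append]
    simp only [List.foldl_cons, List.foldl_nil]
    constructor
    · rw [pvAdd_length]; exact ihlen
    · intro j hj1 hj2
      rw [pvAdd_getD fuel n hn _ (1 + (mN : Int)) 1 (by omega) (by omega) ihlen j hj1 hj2,
        ihJ j hj1 hj2, List.countP_append, List.countP_cons, List.countP_nil]
      push_cast
      split_ifs <;> push_cast <;> ring

theorem map_pyGetD_take (xs : List Int) :
    ∀ m : Nat, m ≤ xs.length →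
      (PySem.List.pyRange 0 (m : Int) 1).map (fun i => PySem.List.pyGetD xs i 0) = xs.take m := by
  intro m
  induction m with
  | zero =>
    intro _
    rw [PySem.List.pyRange_one_eq_nil (by omega)]
    simp
  | succ m ih =>
    intro hm
    rw [show ((m + 1 : Nat) : Int) = (m : Int) + 1 by push_cast; ring,
      PySem.List.pyRange_one_succ_right (by omega), List.map_append, ih (by omega)]
    simp only [List.map_cons, List.map_nil]
    rw [PySem.List.pyGetD_natCast, List.getD_eq_getElem _ _ (by omega), List.take_add_one]
    congr 1
    rw [List.getElem?_eq_getElem (by omega)]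
    rfl

-- ===== VERDICT (by name: the statement is the Claim_ definition above) =====
theorem solve_spec : Claim_equal_solve := by
  intro n cs hdom hpre
  show solve n cs = solve_alt n cs
  by_cases hneg : n ≤ 0
  · simp only [solve, solve_alt, if_pos hneg]
    rw [PySem.List.pyRange_neg_one_eq_nil (by omega)]
    simp
  · have hn : 1 ≤ n := by omega
    rcases hpre with h0 | ⟨_, hlen, hbnd⟩
    · omega
    simp only [solve, solve_alt, if_neg hneg]
    rw [show PySem.List.slice cs none (some (n - 1)) = cs.take (n - 1).toNat by
      apply PySem.List.slice_to
      omega]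
    have hmlen : (n - 1).toNat ≤ cs.length := by omega
    have hr : PySem.List.pyRange (n - 1) (-1) (-1) = (PySem.List.pyRange 0 n 1).reverse := by
      have h := PySem.List.pyRange_neg_one_eq_reverse (n - 1) (-1)
      simpa using h
    rw [hr]
    have hmap : ((PySem.List.pyRange 0 n 1).reverse).map
        (fun i => PySem.List.pyGetD (0 :: cs) i 0) = (0 :: cs.take (n - 1).toNat).reverse := by
      rw [List.map_reverse]
      congr 1
      rw [show (n : Int) = ((n.toNat : Nat) : Int) by omega,
        map_pyGetD_take (0 :: cs) n.toNat (by simp; omega),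
        show n.toNat = (n - 1).toNat + 1 by omega, List.take_succ_cons]
      congr 2
      omega
    have hA := List.foldl_map (f := fun i => PySem.List.pyGetD (0 :: cs) i 0)
      (g := fun (st : List Int × List Int) c =>
        (pvAdd (n.toNat + 2) n st.1 (pvBS (n.toNat + 2) st.1 (c + 1) 1 n (-1)) (-1),
          pvBS (n.toNat + 2) st.1 (c + 1) 1 n (-1) :: st.2))
      (l := (PySem.List.pyRange 0 n 1).reverse)
      (init := ((PySem.List.pyRange 1 (n + 1) 1).foldl
        (fun t i => pvAdd (n.toNat + 2) n t i 1) (List.replicate (n + 1).toNat 0),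
        ([] : List Int)))
    rw [hmap] at hA
    rw [← hA]
    obtain ⟨hlenT, hJ⟩ := init_J n hn (n.toNat + 2) rfl n.toNat (n + 1) (by omega) (by omega)
    apply loop_eq n hn (n.toNat + 2) rfl
    · exact hlenT
    · exact PySem.List.pairwise_lt_pyRange_one 1 (n + 1)
    · intro a ha
      have := PySem.List.mem_pyRange_one.mp ha
      omega
    · exact hJ
    · rw [PySem.List.length_pyRange_one]
      simp [List.length_take]
      omega
    · intro k hk
      have hlenrev : (0 :: cs.take (n - 1).toNat).reverse.length = (n - 1).toNat + 1 := by
        simp [List.length_take]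
        omega
      have hlenfull : (0 :: cs.take (n - 1).toNat).length = (n - 1).toNat + 1 := by
        simp [List.length_take]
        omega
      have hk' : k < (0 :: cs.take (n - 1).toNat).length := by omega
      have hval : ∀ t : Nat, t < (0 :: cs.take (n - 1).toNat).length →
          0 ≤ (0 :: cs.take (n - 1).toNat).getD t 0 ∧
            (0 :: cs.take (n - 1).toNat).getD t 0 ≤ (t : Int) := by
        intro t htlt
        cases t with
        | zero => simp
        | succ u =>
          have hu' : u < (n - 1).toNat := by
            rw [hlenfull] at htlt
            omega
          have htake : (cs.take (n - 1).toNat).getD u 0 = cs.getD u 0 := by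
            rw [List.getD_eq_getElem _ _ (by simp [List.length_take]; omega),
              List.getElem_take, ← List.getD_eq_getElem _ _ (by omega)]
          have hu := hbnd u hu'
          rw [List.getD_cons_succ, htake]
          refine ⟨hu.1, ?_⟩
          push_cast
          omega
      have hrev : (0 :: cs.take (n - 1).toNat).reverse.getD k 0 =
          (0 :: cs.take (n - 1).toNat).getD ((0 :: cs.take (n - 1).toNat).length - 1 - k) 0 := by
        rw [List.getD_eq_getElem _ _ hk, List.getElem_reverse,
          ← List.getD_eq_getElem _ _ (by omega)]
      rw [hrev]
      have hv := hval ((0 :: cs.take (n - 1).toNat).length - 1 - k) (by omega)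
      refine ⟨hv.1, ?_⟩
      calc (0 :: cs.take (n - 1).toNat).getD ((0 :: cs.take (n - 1).toNat).length - 1 - k) 0
          ≤ (((0 :: cs.take (n - 1).toNat).length - 1 - k : Nat) : Int) := hv.2
        _ = (((0 :: cs.take (n - 1).toNat).reverse.length - 1 - k : Nat) : Int) := by
            congr 1
            simp
    · rfl
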